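-- pv_equiv track=rewrite | github.com/JustNekr/alghorithms_data_strctures | task_1.py | maxSubZero2_1
-- ===== SOURCE A (Python) =====
-- def maxSubZero2_1(arr):
--     x = 0
--     idx = - 1
--     while x < len(arr):
--         if arr[x] < 0 and idx == -1:
--             idx = x
--         elif arr[idx] < arr[x] < 0:
--             idx = x
--         x += 1
--     return idx, arr[idx]
-- ===== SOURCE B (Python) =====
-- def maxSubZero2_1(arr):
--     negs = [v for v in arr if v < 0]
--     idx = arr.index(max(negs)) if negs else -1
--     return idx, arr[idx]
-- ===== Notes on version B (the rewrite author's own statement) =====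
-- stated objective: idiomatic
-- what changed: Replaces A's single manual tracking scan (index variable updated under two chained conditions) with a filter/max/index decomposition: collect the negatives, take their maximum, and look up its first position; the final arr[idx] keeps A's behaviour of returning the last element when there are no negatives.
import Mathlib
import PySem

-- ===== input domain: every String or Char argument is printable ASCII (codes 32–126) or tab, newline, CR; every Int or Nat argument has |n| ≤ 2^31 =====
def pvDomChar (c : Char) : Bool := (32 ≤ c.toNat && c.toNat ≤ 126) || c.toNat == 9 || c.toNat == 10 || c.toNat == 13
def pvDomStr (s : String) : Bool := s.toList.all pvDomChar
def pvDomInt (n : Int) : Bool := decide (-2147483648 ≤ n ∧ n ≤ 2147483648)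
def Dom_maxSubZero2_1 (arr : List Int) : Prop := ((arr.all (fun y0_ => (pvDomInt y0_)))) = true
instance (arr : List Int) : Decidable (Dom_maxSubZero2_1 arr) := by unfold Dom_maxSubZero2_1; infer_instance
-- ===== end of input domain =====

-- B replaces A's single tracking scan with a filter/max/index decomposition (idiomatic; same O(n) cost).
-- Pre_ excludes only the empty list, on which the Python A raises IndexError (arr[-1]); B raises there too.


-- ===== PORT A =====
-- while x < len(arr): track idx; the .getD 0 defaults are never the read value on inputs
-- where the Python returns (every pyGet? below is in range once the loop runs / arr ≠ []).
def maxSubZero2_1 (arr : List Int) : Int × Int :=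
  let idx := (List.range arr.length).foldl (fun (idx : Int) (x : Nat) =>
      let ax := (PySem.List.pyGet? arr (x : Int)).getD 0
      if ax < 0 ∧ idx = -1 then (x : Int)
      else if (PySem.List.pyGet? arr idx).getD 0 < ax ∧ ax < 0 then (x : Int)
      else idx) (-1)
  (idx, (PySem.List.pyGet? arr idx).getD 0)

-- ===== PORT B =====
-- negs = [v for v in arr if v < 0]; idx = arr.index(max(negs)) if negs else -1; return idx, arr[idx]
-- (arr.index never fails here since max(negs) ∈ arr; .getD 0 is never the read value)
def maxSubZero2_1_alt (arr : List Int) : Int × Int :=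
  let negs := arr.filter (fun v => decide (v < 0))
  let idx : Int :=
    match PySem.List.max? negs (fun y => y) with
    | none => -1
    | some m => ((PySem.List.index? arr m).getD 0 : Nat)
  (idx, (PySem.List.pyGet? arr idx).getD 0)

-- ===== PRECONDITION & SPEC =====
-- Pre_ excludes only the empty list: there the Python A raises IndexError (arr[-1]), returning no value.
def Pre_maxSubZero2_1 (arr : List Int) : Prop := arr ≠ []
instance (arr : List Int) : Decidable (Pre_maxSubZero2_1 arr) := by unfold Pre_maxSubZero2_1; infer_instance
def pvWitness_maxSubZero2_1 : List Int := [-2, 3]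
def Spec_maxSubZero2_1 (arr : List Int) (out : Int × Int) : Prop := out = maxSubZero2_1_alt arr
instance (arr : List Int) (out : Int × Int) : Decidable (Spec_maxSubZero2_1 arr out) := by unfold Spec_maxSubZero2_1; infer_instance

-- ===== CLAIM (what is proved, stated in full; the proofs are below) =====
def Claim_equal_maxSubZero2_1 : Prop := ∀ (arr : List Int), Dom_maxSubZero2_1 arr → Pre_maxSubZero2_1 arr → Spec_maxSubZero2_1 arr (maxSubZero2_1 arr)

-- ===== LEMMAS AND PROOFS =====

-- A's loop state after k iterations
def pvLoopIdx (arr : List Int) (k : Nat) : Int :=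
  (List.range k).foldl (fun (idx : Int) (x : Nat) =>
      let ax := (PySem.List.pyGet? arr (x : Int)).getD 0
      if ax < 0 ∧ idx = -1 then (x : Int)
      else if (PySem.List.pyGet? arr idx).getD 0 < ax ∧ ax < 0 then (x : Int)
      else idx) (-1)

-- the invariant: after k steps, the loop index is -1 iff the first k entries hold no
-- negative, and otherwise it is the first position in arr of the max negative of the prefix
def pvInv (arr : List Int) (k : Nat) : Prop :=
  ((arr.take k).filter (fun v => decide (v < 0)) = [] ∧ pvLoopIdx arr k = -1) ∨
  (∃ m j, PySem.List.max? ((arr.take k).filter (fun v => decide (v < 0))) (fun y => y) = some m ∧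
    PySem.List.index? arr m = some j ∧ pvLoopIdx arr k = (j : Int) ∧ j < k)

theorem pv_foldl_max_eq (x : Int) (t : List Int) (m : Int)
    (hm : m ∈ x :: t) (hle : ∀ y ∈ x :: t, y ≤ m) : t.foldl max x = m := by
  have h1 := PySem.List.le_foldl_max t x
  have h2 := PySem.List.foldl_max_mem t x
  have hub : t.foldl max x ≤ m := by
    rcases h2 with h | h
    · rw [h]; exact hle x (List.mem_cons_self)
    · exact hle _ (List.mem_cons_of_mem _ h)
  have hlb : m ≤ t.foldl max x := by
    rcases List.mem_cons.mp hm with h | h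
    · rw [h]; exact h1.1
    · exact h1.2 m h
  omega

theorem pv_max?_append_singleton (x : Int) (t : List Int) (a : Int) :
    PySem.List.max? ((x :: t) ++ [a]) (fun y => y) = some (max (t.foldl max x) a) := by
  have h : (x :: t) ++ [a] = x :: (t ++ [a]) := rfl
  rw [h, PySem.List.max?_id_cons, List.foldl_append]
  simp [List.foldl]

theorem pv_inv (arr : List Int) : ∀ k, k ≤ arr.length → pvInv arr k := by
  intro k
  induction k with
  | zero => intro _; left; simp [pvLoopIdx]
  | succ k ih =>
    intro hk1
    have hk : k < arr.length := by omega
    have ihh := ih (by omega)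
    obtain ⟨a, ha⟩ : ∃ a, arr[k] = a := ⟨arr[k], rfl⟩
    have htake : arr.take (k+1) = arr.take k ++ [a] := by
      rw [List.take_add_one, List.getElem?_eq_getElem hk, ha]; rfl
    have hget : (PySem.List.pyGet? arr ((k : Nat) : Int)).getD 0 = a := by
      simp [PySem.List.pyGet?_natCast, List.getElem?_eq_getElem hk, ha]
    have hstep : pvLoopIdx arr (k+1) =
        (if a < 0 ∧ pvLoopIdx arr k = -1 then ((k : Nat) : Int)
         else if (PySem.List.pyGet? arr (pvLoopIdx arr k)).getD 0 < a ∧ a < 0 then ((k : Nat) : Int)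
         else pvLoopIdx arr k) := by
      unfold pvLoopIdx
      rw [List.range_succ, List.foldl_append]
      simp [List.foldl, List.getElem?_eq_getElem hk, ha]
    rcases ihh with ⟨hneg, hidx⟩ | ⟨m, j, hmax, hind, hidx, hjk⟩
    · -- no negative in the first k entries, loop index is -1
      by_cases hA : a < 0
      · right
        have hnotmem : a ∉ arr.take k := by
          intro hmem
          have : a ∈ (arr.take k).filter (fun v => decide (v < 0)) := by
            simp [List.mem_filter, hmem, hA]
          simp [hneg] at this
        refine ⟨a, k, ?_, ?_, ?_, by omega⟩
        · rw [htake, List.filter_append, hneg]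
          simp [hA, PySem.List.max?_id_cons]
        · rw [PySem.List.index?_eq_some_iff]
          refine ⟨arr.take k, arr.drop (k+1), ?_, by simp [List.length_take]; omega, hnotmem⟩
          rw [← ha]
          conv_lhs => rw [← List.take_append_drop k arr]
          rw [List.drop_eq_getElem_cons hk]
        · rw [hstep, if_pos ⟨hA, hidx⟩]
      · left
        constructor
        · rw [htake, List.filter_append, hneg]; simp [hA]
        · rw [hstep, if_neg (by tauto), if_neg (by tauto)]; exact hidx
    · -- m is the max negative of the prefix, loop index is its first position j
      have hmem := PySem.List.max?_mem hmax
      have hisMax := PySem.List.max?_isMax hmax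
      have hmneg : m < 0 := by
        have := (List.mem_filter.mp hmem).2; simpa using this
      have hmtake : m ∈ arr.take k := (List.mem_filter.mp hmem).1
      obtain ⟨hjlen, hja, hmin⟩ := PySem.List.getElem_of_index?_eq_some hind
      have hgetj : (PySem.List.pyGet? arr (pvLoopIdx arr k)).getD 0 = m := by
        rw [hidx]
        simp [PySem.List.pyGet?_natCast, List.getElem?_eq_getElem hjlen, hja]
      have hne1 : ¬ ((j : Int) = -1) := by omega
      -- the filtered prefix is nonempty: write it as a cons
      obtain ⟨x, t, hxt⟩ : ∃ x t, (arr.take k).filter (fun v => decide (v < 0)) = x :: t := by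
        cases hfl : (arr.take k).filter (fun v => decide (v < 0)) with
        | nil => rw [hfl] at hmem; simp at hmem
        | cons x t => exact ⟨x, t, rfl⟩
      have hfoldm : t.foldl max x = m := by
        apply pv_foldl_max_eq
        · rw [← hxt]; exact hmem
        · intro y hy; exact hisMax y (by rw [hxt]; exact hy)
      by_cases hA : m < a ∧ a < 0
      · -- a is a new, strictly larger max negative at position k
        right
        have hnotmem : a ∉ arr.take k := by
          intro hmemA
          have : a ∈ (arr.take k).filter (fun v => decide (v < 0)) := by
            simp [List.mem_filter, hmemA, hA.2]
          have := hisMax a this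
          omega
        refine ⟨a, k, ?_, ?_, ?_, by omega⟩
        · rw [htake, List.filter_append]
          simp only [List.filter, hA.2, decide_true]
          rw [hxt, pv_max?_append_singleton, hfoldm]
          simp [max_eq_right (le_of_lt hA.1)]
        · rw [PySem.List.index?_eq_some_iff]
          refine ⟨arr.take k, arr.drop (k+1), ?_, by simp [List.length_take]; omega, hnotmem⟩
          rw [← ha]
          conv_lhs => rw [← List.take_append_drop k arr]
          rw [List.drop_eq_getElem_cons hk]
        · have hc1 : ¬ (a < 0 ∧ pvLoopIdx arr k = -1) := by
            rw [hidx]; rintro ⟨_, h⟩; omega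
          rw [hstep, if_neg hc1, hgetj, if_pos hA]
      · -- the max negative of the prefix is unchanged
        right
        refine ⟨m, j, ?_, hind, ?_, by omega⟩
        · rw [htake, List.filter_append]
          by_cases hA2 : a < 0
          · have hle : a ≤ m := by
              rcases not_and_or.mp hA with h | h
              · omega
              · exact absurd hA2 h
            simp only [List.filter, hA2, decide_true]
            rw [hxt, pv_max?_append_singleton, hfoldm]
            simp [max_eq_left hle]
          · simp [hA2, hmax]
        · have hc1 : ¬ (a < 0 ∧ pvLoopIdx arr k = -1) := by
            rw [hidx]; rintro ⟨_, h⟩; omega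
          rw [hstep, if_neg hc1, hgetj, if_neg hA]; exact hidx

theorem maxSubZero2_1_eq (arr : List Int) : maxSubZero2_1 arr = maxSubZero2_1_alt arr := by
  have hinv := pv_inv arr arr.length (le_refl _)
  unfold pvInv at hinv
  rw [List.take_length] at hinv
  unfold maxSubZero2_1 maxSubZero2_1_alt
  have hL : (List.range arr.length).foldl (fun (idx : Int) (x : Nat) =>
      let ax := (PySem.List.pyGet? arr (x : Int)).getD 0
      if ax < 0 ∧ idx = -1 then (x : Int)
      else if (PySem.List.pyGet? arr idx).getD 0 < ax ∧ ax < 0 then (x : Int)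
      else idx) (-1) = pvLoopIdx arr arr.length := rfl
  rcases hinv with ⟨hneg, hidx⟩ | ⟨m, j, hmax, hind, hidx, _⟩
  · simp only [hL, hidx, hneg]
    simp [PySem.List.max?]
  · simp only [hL, hidx, hmax, hind]
    simp

-- ===== VERDICT (by name: the statement is the Claim_ definition above) =====
theorem maxSubZero2_1_spec : Claim_equal_maxSubZero2_1 := by
  intro arr _ _
  unfold Spec_maxSubZero2_1
  exact maxSubZero2_1_eq arr
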